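-- pv_equiv track=rewrite | github.com/SHENG-KAI-HUANG/IRIE_termproject1_record | set based model.py | termset_function
-- ===== SOURCE A (Python) =====
-- from itertools import combinations;#用來組成termset，換句話說，index term的組合
--
-- def termset_function(query):#利用python內建的combinations(排列組合的組合)建立termset
--     query_temp = query.split();
--     termset_f = [];
--     for i in range(1, len(query_temp) + 1):
--         termset_temp = list(combinations(query_temp, i));#i代表是具有多少元素的組合
--         for j in range(0, len(termset_temp)):
--             termset_temp[j] = " ".join(termset_temp[j]);#因為組合的元素是list型態，所以轉回string
--             termset_f.append(termset_temp[j]);#放在一組list中回傳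
--     return termset_f;
-- ===== SOURCE B (Python) =====
-- def termset_function(query):
--     # Iterative frontier expansion: combos of size k+1 are produced by extending
--     # each size-k combo (kept with its remaining suffix) by each later term,
--     # which reproduces itertools.combinations' size-major lexicographic order.
--     terms = query.split()
--     out = []
--     frontier = [([], terms)]  # (chosen terms, remaining suffix)
--     for _ in range(len(terms)):
--         new_frontier = []
--         for chosen, suffix in frontier:
--             for idx in range(len(suffix)):
--                 new_frontier.append((chosen + [suffix[idx]], suffix[idx + 1:]))
--         frontier = new_frontier
--         for chosen, _ in frontier:
--             out.append(" ".join(chosen))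
--     return out
-- ===== Notes on version B (the rewrite author's own statement) =====
-- stated objective: alternative
-- what changed: Replaced the itertools.combinations call per size with an iterative frontier expansion that extends each size-k combination (kept with its remaining suffix) into the size-(k+1) combinations, preserving the size-major lexicographic order.
import Mathlib
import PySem

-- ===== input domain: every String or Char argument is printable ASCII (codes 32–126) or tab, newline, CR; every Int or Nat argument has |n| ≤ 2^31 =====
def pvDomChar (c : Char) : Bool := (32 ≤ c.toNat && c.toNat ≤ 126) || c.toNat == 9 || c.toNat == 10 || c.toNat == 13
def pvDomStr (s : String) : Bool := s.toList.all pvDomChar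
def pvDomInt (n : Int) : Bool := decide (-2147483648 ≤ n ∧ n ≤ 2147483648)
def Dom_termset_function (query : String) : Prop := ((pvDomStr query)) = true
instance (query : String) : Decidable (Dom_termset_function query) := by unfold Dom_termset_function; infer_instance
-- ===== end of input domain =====

-- B replaces the itertools.combinations call by an iterative frontier expansion
-- (each size-k combination kept with its remaining suffix and extended to size k+1);
-- objective: alternative (same output, same asymptotic cost, no itertools).

-- ===== PORT A =====
-- itertools.combinations(pool, r) in its lexicographic order (library call ported as a Lean function)
def pyCombs : List String → Nat → List (List String)
  | _, 0 => [[]]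
  | [], _ + 1 => []
  | x :: xs, k + 1 => ((pyCombs xs k).map (fun c => x :: c)) ++ pyCombs xs (k + 1)

def termset_function (query : String) : List String :=
  let query_temp := PySem.Str.split₀ query
  (PySem.List.pyRange 1 ((query_temp.length : Int) + 1) 1).foldl
    (fun termset_f i =>
      let termset_temp := pyCombs query_temp i.toNat
      termset_temp.foldl (fun acc t => acc ++ [PySem.Str.join " " t]) termset_f)
    []

-- ===== PORT B =====
-- inner 'for idx in range(len(suffix))' loop of Source B (chosen + [suffix[idx]], suffix[idx+1:])
def altExt (chosen : List String) : List String → List (List String × List String)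
  | [] => []
  | y :: ys => (chosen ++ [y], ys) :: altExt chosen ys

-- one pass over the frontier
def altStep (fr : List (List String × List String)) : List (List String × List String) :=
  fr.flatMap (fun p => altExt p.1 p.2)

-- the 'for _ in range(len(terms))' loop of Source B
def altLoop : Nat → List (List String × List String) → List String → List String
  | 0, _, out => out
  | n + 1, fr, out =>
      let fr' := altStep fr
      altLoop n fr' (out ++ fr'.map (fun p => PySem.Str.join " " p.1))

def termset_function_alt (query : String) : List String :=
  let terms := PySem.Str.split₀ query
  altLoop terms.length [([], terms)] []

-- ===== PRECONDITION & SPEC =====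
def Spec_termset_function (query : String) (out : List String) : Prop := out = termset_function_alt query
instance (query : String) (out : List String) : Decidable (Spec_termset_function query out) := by unfold Spec_termset_function; infer_instance

-- ===== CLAIM (what is proved, stated in full; the proofs are below) =====
def Claim_equal_termset_function : Prop := ∀ (query : String), Dom_termset_function query → Spec_termset_function query (termset_function query)

-- ===== LEMMAS AND PROOFS =====

-- combinations with their remaining suffix, in the same lexicographic order
def cP : List String → Nat → List (List String × List String)
  | xs, 0 => [([], xs)]
  | [], _ + 1 => []
  | x :: xs, k + 1 => ((cP xs k).map (fun p => (x :: p.1, p.2))) ++ cP xs (k + 1)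

theorem pyCombs_eq_cP (xs : List String) : ∀ k, pyCombs xs k = (cP xs k).map Prod.fst := by
  induction xs with
  | nil => intro k; cases k <;> simp [pyCombs, cP]
  | cons x xs ih =>
      intro k
      cases k with
      | zero => simp [pyCombs, cP]
      | succ k => simp [pyCombs, cP, ih, List.map_map, Function.comp]

theorem altExt_cons (x : String) (c : List String) (s : List String) :
    altExt (x :: c) s = (altExt c s).map (fun q => (x :: q.1, q.2)) := by
  induction s with
  | nil => simp [altExt]
  | cons y ys ih => simp [altExt, ih]

theorem altStep_cP (xs : List String) : ∀ k, altStep (cP xs k) = cP xs (k + 1) := by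
  induction xs with
  | nil =>
      intro k
      cases k <;> simp [cP, altStep, altExt]
  | cons x xs ih =>
      intro k
      cases k with
      | zero =>
          have h0 := ih 0
          simp [cP, altStep, altExt] at h0 ⊢
          simpa [altStep, cP, altExt] using h0
      | succ k =>
          have h1 := ih k
          have h2 := ih (k + 1)
          simp [cP, altStep] at h1 h2 ⊢
          simp [List.flatMap_map, altExt_cons, h2]
          rw [← h1]
          simp [List.map_flatMap]

theorem altLoop_cP (xs : List String) :
    ∀ (m k : Nat) (acc : List String),
      altLoop m (cP xs k) acc =
        acc ++ (List.range m).flatMap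
          (fun j => (cP xs (k + 1 + j)).map (fun p => PySem.Str.join " " p.1)) := by
  intro m
  induction m with
  | zero => intro k acc; simp [altLoop]
  | succ m ih =>
      intro k acc
      have hstep := altStep_cP xs k
      have := ih (k + 1) (acc ++ (cP xs (k + 1)).map (fun p => PySem.Str.join " " p.1))
      rw [altLoop, hstep, this, List.range_succ_eq_map]
      simp [List.flatMap_map, Nat.add_comm, Nat.add_left_comm]

theorem foldl_append_join (L : List (List String)) :
    ∀ acc : List String,
      L.foldl (fun a t => a ++ [PySem.Str.join " " t]) acc = acc ++ L.map (PySem.Str.join " ") := by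
  induction L with
  | nil => intro acc; simp
  | cons t L ih => intro acc; simp [ih]

theorem A_fold (qt : List String) :
    ∀ (n : Nat) (acc : List String),
      (PySem.List.pyRange 1 ((n : Int) + 1) 1).foldl
        (fun termset_f i =>
          (pyCombs qt i.toNat).foldl (fun a t => a ++ [PySem.Str.join " " t]) termset_f) acc =
      acc ++ (List.range n).flatMap (fun j => (pyCombs qt (j + 1)).map (PySem.Str.join " ")) := by
  intro n
  induction n with
  | zero =>
      intro acc
      rw [PySem.List.pyRange_one_eq_nil (by norm_num)]
      simp
  | succ n ih =>
      intro acc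
      have hcast : (((n + 1 : Nat) : Int) + 1) = ((n : Int) + 1) + 1 := by push_cast; ring
      rw [hcast, PySem.List.pyRange_one_succ_right (by omega), List.foldl_append]
      simp only [List.foldl_cons, List.foldl_nil]
      rw [ih, foldl_append_join]
      have ht : ((n : Int) + 1).toNat = n + 1 := by omega
      rw [ht, List.range_succ]
      simp

theorem B_unfold (qt : List String) :
    altLoop qt.length [([], qt)] [] =
      (List.range qt.length).flatMap
        (fun j => (cP qt (j + 1)).map (fun p => PySem.Str.join " " p.1)) := by
  have h := altLoop_cP qt qt.length 0 []
  simpa [cP, Nat.add_comm] using h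

-- ===== VERDICT (by name: the statement is the Claim_ definition above) =====
theorem termset_function_spec : Claim_equal_termset_function := by
  intro query _
  unfold Spec_termset_function termset_function termset_function_alt
  set qt := PySem.Str.split₀ query with hqt
  rw [B_unfold, A_fold qt qt.length]
  simp [pyCombs_eq_cP, List.map_map, Function.comp_def]
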